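-- pv_equiv track=rewrite | github.com/dkoh12/gamma | upvote/upvote.py | find_non_increasing
-- ===== SOURCE A (Python) =====
-- def find_non_increasing(window):
-- 	lst = [0] * len(window)
--
-- 	for start in range(len(window)):
-- 		temp = start
-- 		for curr in range(start+1, len(window)):
-- 			if window[curr] <= window[temp]:
-- 				temp = curr
-- 				lst[start] += 1
-- 			else:
-- 				break
--
-- 	return sum(lst)
-- ===== SOURCE B (Python) =====
-- def find_non_increasing(window):
--     # One forward pass: each element extending the current non-increasing run
--     # by its k-th step contributes k (once per earlier start in the run).
--     total = 0
--     c = 0  # length-1 of the maximal non-increasing run ending at prev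
--     prev = None
--     for x in window:
--         if prev is not None and x <= prev:
--             c += 1
--             total += c
--         else:
--             c = 0
--         prev = x
--     return total
-- ===== Notes on version B (the rewrite author's own statement) =====
-- stated objective: faster
-- what changed: Replaced the quadratic per-start rescan with a single forward pass maintaining the current non-increasing run length, each step contributing the run length so far.
import Mathlib
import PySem

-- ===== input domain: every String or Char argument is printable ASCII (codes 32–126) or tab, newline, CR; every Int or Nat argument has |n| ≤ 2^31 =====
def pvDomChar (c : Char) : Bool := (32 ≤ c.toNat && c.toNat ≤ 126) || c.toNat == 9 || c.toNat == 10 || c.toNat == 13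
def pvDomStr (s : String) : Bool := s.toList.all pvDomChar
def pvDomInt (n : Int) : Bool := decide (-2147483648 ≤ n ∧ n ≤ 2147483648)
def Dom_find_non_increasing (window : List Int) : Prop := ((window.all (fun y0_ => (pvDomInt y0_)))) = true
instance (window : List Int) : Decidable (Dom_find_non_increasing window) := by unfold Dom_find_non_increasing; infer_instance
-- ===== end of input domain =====

-- B replaces A's quadratic per-start inner rescan by one forward pass keeping the
-- current non-increasing run length (objective: faster, asymptotic O(n^2) → O(n)).

-- ===== PORT A =====
-- inner loop: `for curr in range(start+1, len(window)): if window[curr] <= window[temp]: temp = curr; lst[start] += 1 else: break`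
def findNIInner (w : List Int) (n temp curr : Nat) (acc : Int) : Int :=
  if _h : curr < n then
    match PySem.List.pyGet? w (curr : Int), PySem.List.pyGet? w (temp : Int) with
    | some wc, some wt =>
      if wc ≤ wt then findNIInner w n curr (curr + 1) (acc + 1) else acc
    | _, _ => acc
  else acc
termination_by n - curr

-- lst[start] is only ever read by the final sum, so the port sums the per-start counts.
def find_non_increasing (window : List Int) : Int :=
  ((List.range window.length).map
    (fun start => findNIInner window window.length start (start + 1) 0)).sum

-- ===== PORT B =====
-- state (total, c, prev) of Source B's single forward loop
def findNIStep (st : Int × Int × Option Int) (x : Int) : Int × Int × Option Int :=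
  match st with
  | (total, c, prev) =>
    match prev with
    | some p => if x ≤ p then (total + (c + 1), c + 1, some x) else (total, 0, some x)
    | none => (total, 0, some x)

def find_non_increasing_alt (window : List Int) : Int :=
  (window.foldl findNIStep (0, 0, none)).1

-- ===== PRECONDITION & SPEC =====
def Spec_find_non_increasing (window : List Int) (out : Int) : Prop := out = find_non_increasing_alt window
instance (window : List Int) (out : Int) : Decidable (Spec_find_non_increasing window out) := by unfold Spec_find_non_increasing; infer_instance

-- ===== CLAIM (what is proved, stated in full; the proofs are below) =====
def Claim_equal_find_non_increasing : Prop := ∀ (window : List Int), Dom_find_non_increasing window → Spec_find_non_increasing window (find_non_increasing window)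

-- ===== LEMMAS AND PROOFS =====

-- length of the non-increasing chain continuing from previous value p into t
def chainLen (p : Int) : List Int → Int
  | [] => 0
  | x :: t => if x ≤ p then chainLen x t + 1 else 0

-- sum over all suffixes of the chain length from the suffix's head
def sumRuns : List Int → Int
  | [] => 0
  | x :: t => chainLen x t + sumRuns t

lemma findNIInner_eq (w : List Int) :
    ∀ (fuel temp : Nat) (acc : Int), w.length - temp ≤ fuel → temp < w.length →
      findNIInner w w.length temp (temp + 1) acc = acc + chainLen (w.getD temp 0) (w.drop (temp + 1)) := by
  intro fuel
  induction fuel with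
  | zero => intro temp acc hf ht; omega
  | succ k ih =>
    intro temp acc hf ht
    unfold findNIInner
    by_cases h : temp + 1 < w.length
    · have hget : PySem.List.pyGet? w ((temp + 1 : Nat) : Int) = some w[temp + 1] :=
        PySem.List.pyGet?_ofNat w (temp + 1) h
      have hget' : PySem.List.pyGet? w ((temp : Nat) : Int) = some w[temp] :=
        PySem.List.pyGet?_ofNat w temp ht
      have hdrop : w.drop (temp + 1) = w[temp + 1] :: w.drop (temp + 2) :=
        (List.getElem_cons_drop h).symm
      have hgd : w.getD temp 0 = w[temp] := List.getD_eq_getElem w 0 ht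
      have hgd' : w.getD (temp + 1) 0 = w[temp + 1] := List.getD_eq_getElem w 0 h
      simp only [h, dif_pos, hget, hget']
      by_cases hle : w[temp + 1] ≤ w[temp]
      · rw [if_pos hle]
        rw [ih (temp + 1) (acc + 1) (by omega) h]
        rw [hdrop, hgd, hgd']
        simp [chainLen, hle]
        ring
      · rw [if_neg hle, hgd, hdrop]
        simp [chainLen, hle]
    · have hdrop : w.drop (temp + 1) = [] := List.drop_eq_nil_of_le (by omega)
      simp [h, hdrop, chainLen]

lemma find_non_increasing_eq_sumRuns (w : List Int) :
    find_non_increasing w = sumRuns w := by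
  unfold find_non_increasing
  induction w with
  | nil => simp [sumRuns]
  | cons x t ih =>
    rw [List.length_cons, List.range_succ_eq_map]
    simp only [List.map_cons, List.map_map, List.sum_cons]
    have hhead : findNIInner (x :: t) (t.length + 1) 0 (0 + 1) 0 = chainLen x t := by
      have h := findNIInner_eq (x :: t) (x :: t).length 0 0 (by omega) (by simp)
      simpa using h
    have htail :
        (List.range t.length).map ((fun start => findNIInner (x :: t) (t.length + 1) start (start + 1) 0) ∘ Nat.succ)
          = (List.range t.length).map (fun start => findNIInner t t.length start (start + 1) 0) := by
      apply List.map_congr_left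
      intro s hs
      rw [List.mem_range] at hs
      have h1 := findNIInner_eq (x :: t) (x :: t).length (s + 1) 0 (by omega) (by simp; omega)
      have h2 := findNIInner_eq t t.length s 0 (by omega) hs
      simp only [Function.comp_apply, Nat.succ_eq_add_one]
      have hl : (x :: t).length = t.length + 1 := by simp
      rw [← hl, h1, h2]
      simp [List.drop_succ_cons]
    rw [hhead, htail, ih, sumRuns]

-- fold invariant for B's loop
lemma foldl_findNIStep (t : List Int) :
    ∀ (total c : Int) (p : Int),
      (t.foldl findNIStep (total, c, some p)).1 = total + sumRuns (p :: t) + c * chainLen p t := by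
  induction t with
  | nil => intro total c p; simp [sumRuns, chainLen]
  | cons x t ih =>
    intro total c p
    by_cases hle : x ≤ p
    · simp only [List.foldl_cons, findNIStep, hle, if_pos]
      rw [ih]
      simp [sumRuns, chainLen, hle]
      ring
    · simp only [List.foldl_cons, findNIStep, hle, if_neg, not_false_iff]
      rw [ih]
      simp [sumRuns, chainLen, hle]

lemma find_non_increasing_alt_eq_sumRuns (w : List Int) :
    find_non_increasing_alt w = sumRuns w := by
  cases w with
  | nil => simp [find_non_increasing_alt, sumRuns]
  | cons x t =>
    show (List.foldl findNIStep (findNIStep (0, 0, none) x) t).1 = sumRuns (x :: t)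
    rw [show findNIStep (0, 0, none) x = (0, 0, some x) from rfl, foldl_findNIStep]
    simp

-- ===== VERDICT (by name: the statement is the Claim_ definition above) =====
theorem find_non_increasing_spec : Claim_equal_find_non_increasing := by
  intro window _
  unfold Spec_find_non_increasing
  rw [find_non_increasing_eq_sumRuns, find_non_increasing_alt_eq_sumRuns]
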